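-- pv_equiv track=rewrite | github.com/d1zm4as/CodeWars | Python/6 Kyu/eleminations_tournoment.py | tourney
-- ===== SOURCE A (Python) =====
-- def tourney(inp):
--     res = [inp]
--     temp = []
--     while len(inp) > 1:
--         for i in range(0, len(inp), 2):
--             if i+1 == len(inp):
--                 temp.insert(0, inp[i])
--             else:
--                 temp.append(max(inp[i], inp[i+1]))
--         inp = temp
--         res.append(temp)
--         temp = []
--     return res
-- ===== SOURCE B (Python) =====
-- def tourney(inp):
--     # recursive decomposition: one round = pairwise maxima, odd leftover prepended
--     if len(inp) <= 1:
--         return [inp]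
--     return [inp] + tourney(_next_round(inp))
--
-- def _next_round(xs):
--     if len(xs) % 2 == 1:
--         return [xs[-1]] + _pairs(xs[:-1])
--     return _pairs(xs)
--
-- def _pairs(xs):
--     # consume two elements at a time, taking the max of each consecutive pair
--     it = iter(xs)
--     return [max(a, b) for a, b in zip(it, it)]
-- ===== Notes on version B (the rewrite author's own statement) =====
-- stated objective: alternative
-- what changed: Replaced the while-loop with mutable temp/res accumulators by a head recursion on rounds ([inp] + tourney(next_round)), where next_round is built structurally two elements at a time instead of by an index loop over range(0,len,2).
import Mathlib
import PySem

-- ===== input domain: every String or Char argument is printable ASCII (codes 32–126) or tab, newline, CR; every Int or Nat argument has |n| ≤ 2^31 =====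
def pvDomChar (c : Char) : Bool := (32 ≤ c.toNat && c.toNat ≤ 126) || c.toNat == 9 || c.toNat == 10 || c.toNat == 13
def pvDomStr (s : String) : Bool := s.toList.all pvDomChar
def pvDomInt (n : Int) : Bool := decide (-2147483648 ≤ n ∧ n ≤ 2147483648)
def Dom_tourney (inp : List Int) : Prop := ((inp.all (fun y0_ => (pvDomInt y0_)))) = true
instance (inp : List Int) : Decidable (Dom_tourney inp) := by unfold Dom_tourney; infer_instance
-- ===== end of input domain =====

-- B replaces A's while-loop with forward accumulators by a head recursion on rounds,
-- building each round structurally two elements at a time (alternative decomposition, same cost).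

-- ===== PORT A =====
-- the inner `for i in range(0, len(inp), 2)` with its temp accumulator (append / insert(0,·))
def tourneyRound (inp : List Int) : List Int :=
  (PySem.List.pyRange 0 inp.length 2).foldl
    (fun temp i =>
      if i + 1 = (inp.length : Int) then PySem.List.pyGetD inp i 0 :: temp   -- temp.insert(0, inp[i])
      else temp ++ [max (PySem.List.pyGetD inp i 0) (PySem.List.pyGetD inp (i + 1) 0)])
    []

-- the `while len(inp) > 1` loop, state (inp, res); the Nat argument is plain fuel making the
-- loop structurally total (inp.length suffices: each round is strictly shorter, see round_length_lt below)
def tourneyLoop : Nat → List Int → List (List Int) → List (List Int)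
  | 0, _, res => res
  | fuel + 1, inp, res =>
      if 1 < inp.length then
        let temp := tourneyRound inp
        tourneyLoop fuel temp (res ++ [temp])
      else res

def tourney (inp : List Int) : List (List Int) := tourneyLoop inp.length inp [inp]

-- ===== PORT B =====
-- _pairs: zip(it, it) pairs up consecutive elements, mapping max — ported as the same
-- two-at-a-time consumption of the list
def pvPairs : List Int → List Int
  | [] => []
  | [_] => []
  | a :: b :: r => max a b :: pvPairs r

-- _next_round; xs[:-1] is List.dropLast (exact for lists), xs[-1] is PySem.List.pyGetD xs (-1)
def pvNext (xs : List Int) : List Int :=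
  if xs.length % 2 = 1 then PySem.List.pyGetD xs (-1) 0 :: pvPairs xs.dropLast
  else pvPairs xs

-- Source B's recursion on rounds, made structurally total with the same fuel (inp.length suffices)
def tourneyAltGo : Nat → List Int → List (List Int)
  | 0, inp => [inp]
  | fuel + 1, inp =>
      if inp.length ≤ 1 then [inp] else inp :: tourneyAltGo fuel (pvNext inp)

def tourney_alt (inp : List Int) : List (List Int) := tourneyAltGo inp.length inp

-- ===== PRECONDITION & SPEC =====
def Spec_tourney (inp : List Int) (out : List (List Int)) : Prop := out = tourney_alt inp
instance (inp : List Int) (out : List (List Int)) : Decidable (Spec_tourney inp out) := by unfold Spec_tourney; infer_instance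

-- ===== CLAIM (what is proved, stated in full; the proofs are below) =====
def Claim_equal_tourney : Prop := ∀ (inp : List Int), Dom_tourney inp → Spec_tourney inp (tourney inp)

-- ===== LEMMAS AND PROOFS =====
-- tail-recursive characterisation of A's inner loop on the suffix it still has to scan
def pvMunch : List Int → List Int → List Int
  | [], temp => temp
  | [y], temp => y :: temp
  | a :: b :: r, temp => pvMunch r (temp ++ [max a b])

theorem foldl_step_munch (inp : List Int) :
    ∀ (m j : Nat) (temp : List Int), m = (inp.length - 2 * j + 1) / 2 →
      ((List.range' j m).map (fun (k : Nat) => (0 : Int) + 2 * (k : Int))).foldl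
        (fun temp i =>
          if i + 1 = (inp.length : Int) then PySem.List.pyGetD inp i 0 :: temp
          else temp ++ [max (PySem.List.pyGetD inp i 0) (PySem.List.pyGetD inp (i + 1) 0)])
        temp
      = pvMunch (inp.drop (2 * j)) temp := by
  intro m
  induction m with
  | zero =>
      intro j temp hm
      have hle : inp.length ≤ 2 * j := by omega
      have : inp.drop (2 * j) = [] := List.drop_eq_nil_of_le hle
      simp [this, pvMunch]
  | succ m ih =>
      intro j temp hm
      have hlt : 2 * j < inp.length := by omega
      rw [List.range'_succ, List.map_cons, List.foldl_cons]
      have hidx : ((0 : Int) + 2 * (j : Int)) = ((2 * j : Nat) : Int) := by push_cast; ring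
      by_cases hlast : 2 * j + 1 = inp.length
      · have hcond : ((0 : Int) + 2 * (j : Int)) + 1 = (inp.length : Int) := by
          omega
        rw [if_pos hcond, hidx, PySem.List.pyGetD_natCast]
        rw [ih (j + 1) _ (by omega)]
        have h2 : inp.drop (2 * (j + 1)) = [] := List.drop_eq_nil_of_le (by omega)
        rw [List.drop_eq_getElem_cons hlt]
        have h1 : inp.drop (2 * j + 1) = [] := List.drop_eq_nil_of_le (by omega)
        simp [h1, h2, pvMunch, List.getD_eq_getElem?_getD, List.getElem?_eq_getElem hlt]
      · have hcond : ¬ (((0 : Int) + 2 * (j : Int)) + 1 = (inp.length : Int)) := by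
          omega
        have hlt2 : 2 * j + 1 < inp.length := by omega
        rw [if_neg hcond, hidx]
        have hidx2 : ((2 * j : Nat) : Int) + 1 = ((2 * j + 1 : Nat) : Int) := by push_cast; ring
        rw [hidx2, PySem.List.pyGetD_natCast, PySem.List.pyGetD_natCast]
        rw [ih (j + 1) _ (by omega)]
        rw [List.drop_eq_getElem_cons hlt, List.drop_eq_getElem_cons (by omega : 2 * j + 1 < inp.length)]
        have : 2 * j + 1 + 1 = 2 * (j + 1) := by omega
        rw [this]
        simp [pvMunch, List.getD_eq_getElem?_getD, List.getElem?_eq_getElem hlt,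
              List.getElem?_eq_getElem hlt2]

theorem tourneyRound_eq_munch (inp : List Int) : tourneyRound inp = pvMunch inp [] := by
  unfold tourneyRound
  rw [PySem.List.pyRange_of_pos 0 (inp.length : Int) (by norm_num)]
  have hN : (if (0 : Int) < (inp.length : Int) then (((inp.length : Int) - 0 + 2 - 1) / 2).toNat else 0)
      = (inp.length - 2 * 0 + 1) / 2 := by split <;> omega
  rw [hN, List.range_eq_range']
  have := foldl_step_munch inp ((inp.length - 2 * 0 + 1) / 2) 0 [] rfl
  simpa using this

theorem munch_spec (xs temp : List Int) :
    pvMunch xs temp =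
      (if xs.length % 2 = 1 then [xs.getLastD 0] else []) ++ temp ++ pvPairs xs := by
  fun_induction pvMunch xs temp with
  | case1 temp => simp [pvPairs]
  | case2 y temp => simp [pvPairs]
  | case3 a b r temp ih =>
      rw [ih]
      by_cases hodd : r.length % 2 = 1
      · cases r with
        | nil => simp at hodd
        | cons c r' =>
          have hmod : ((a :: b :: c :: r').length) % 2 = ((c :: r').length) % 2 := by
            simp; omega
          rw [hmod]
          simp [pvPairs, List.getLastD_eq_getLast?, List.getLast?_cons_cons]
      · have hmod : ((a :: b :: r).length) % 2 = (r.length) % 2 := by simp; omega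
        rw [hmod]
        simp [hodd, pvPairs]

theorem pvPairs_dropLast_of_odd (xs : List Int) (h : xs.length % 2 = 1) :
    pvPairs xs.dropLast = pvPairs xs := by
  fun_induction pvPairs xs with
  | case1 => simp at h
  | case2 y => simp [pvPairs]
  | case3 a b r ih =>
      have hr : r ≠ [] := by intro hh; subst hh; simp at h
      have hbr : (b :: r) ≠ [] := by simp
      rw [List.dropLast_cons_of_ne_nil hbr, List.dropLast_cons_of_ne_nil hr]
      simp at h
      simp [pvPairs, ih (by omega)]

theorem pvRound_eq (xs : List Int) : tourneyRound xs = pvNext xs := by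
  rw [tourneyRound_eq_munch, munch_spec, pvNext]
  by_cases hodd : xs.length % 2 = 1
  · have hne : xs ≠ [] := by intro h; subst h; simp at hodd
    rw [PySem.List.pyGetD_neg_one _ _ hne, pvPairs_dropLast_of_odd xs hodd]
    simp [hodd, List.getLastD_eq_getLast?, List.getLast?_eq_some_getLast hne]
  · simp [hodd]

theorem pvPairs_length (xs : List Int) : (pvPairs xs).length = xs.length / 2 := by
  fun_induction pvPairs xs with
  | case1 => simp
  | case2 y => simp
  | case3 a b r ih => simp [ih]; omega

theorem pvNext_length_lt (xs : List Int) (h : 1 < xs.length) : (pvNext xs).length < xs.length := by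
  unfold pvNext
  split <;> simp [pvPairs_length] <;> omega

theorem altGo_head (fuel : Nat) (xs : List Int) : ∃ r, tourneyAltGo fuel xs = xs :: r := by
  cases fuel with
  | zero => exact ⟨[], rfl⟩
  | succ f =>
      unfold tourneyAltGo
      split
      · exact ⟨[], rfl⟩
      · exact ⟨_, rfl⟩

theorem loop_eq (fuel : Nat) : ∀ (inp : List Int) (res : List (List Int)),
    inp.length ≤ fuel →
    tourneyLoop fuel inp res = res ++ (tourneyAltGo fuel inp).tail := by
  induction fuel with
  | zero =>
      intro inp res _
      simp [tourneyLoop, tourneyAltGo]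
  | succ f ih =>
      intro inp res hle
      by_cases h : 1 < inp.length
      · have ht : tourneyRound inp = pvNext inp := pvRound_eq inp
        have hlt : (pvNext inp).length < inp.length := pvNext_length_lt inp h
        obtain ⟨r, hr⟩ := altGo_head f (pvNext inp)
        rw [tourneyLoop, if_pos h]
        rw [show tourneyAltGo (f + 1) inp = inp :: tourneyAltGo f (pvNext inp) by
          rw [tourneyAltGo, if_neg (by omega)]]
        rw [ht, ih (pvNext inp) (res ++ [pvNext inp]) (by omega), hr]
        simp
      · rw [tourneyLoop, if_neg h]
        rw [show tourneyAltGo (f + 1) inp = [inp] by rw [tourneyAltGo, if_pos (by omega)]]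
        simp

-- ===== VERDICT (by name: the statement is the Claim_ definition above) =====
theorem tourney_spec : Claim_equal_tourney := by
  intro inp _
  unfold Spec_tourney tourney tourney_alt
  rw [loop_eq inp.length inp [inp] le_rfl]
  obtain ⟨r, hr⟩ := altGo_head inp.length inp
  simp [hr]
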